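-- pv_equiv track=rewrite | github.com/priconceptions/PracticeStuff | CTCI/Python/Chapter 8/8_1.py | countHopsHelper
-- ===== SOURCE A (Python) =====
-- def countHopsHelper(n, memo):
--     if n < 0:
--         return 0
--     elif n == 0:
--         return 1
--     else:
--         if memo[n] != -1:
--             return memo[n]
--         else:
--             memo[n] = countHopsHelper(n-1, memo) + countHopsHelper(n-2, memo) + countHopsHelper(n-3, memo)
--     return memo[n]
-- ===== SOURCE B (Python) =====
-- def countHopsHelper(n, memo):
--     if n < 0:
--         return 0
--     if n == 0:
--         return 1
--     if memo[n] != -1: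
--         return memo[n]
--     for i in range(1, n + 1):
--         if memo[i] == -1:
--             t1 = memo[i - 1] if i > 1 else 1
--             t2 = memo[i - 2] if i > 2 else (1 if i == 2 else 0)
--             t3 = memo[i - 3] if i > 3 else (1 if i == 3 else 0)
--             memo[i] = t1 + t2 + t3
--     return memo[n]
-- ===== Notes on version B (the rewrite author's own statement) =====
-- stated objective: simpler
-- what changed: Replaces A's top-down memoized recursion (three recursive calls per unset slot, writing into memo as it unwinds) with a single bottom-up loop that fills every still-unset slot 1..n from its three predecessors; equivalence is about the return value (both mutate memo, A may leave some -1 slots that B fills).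
-- outside the precondition, e.g. on countHopsHelper(2, [0]): A raises IndexError, B raises IndexError
import Mathlib
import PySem

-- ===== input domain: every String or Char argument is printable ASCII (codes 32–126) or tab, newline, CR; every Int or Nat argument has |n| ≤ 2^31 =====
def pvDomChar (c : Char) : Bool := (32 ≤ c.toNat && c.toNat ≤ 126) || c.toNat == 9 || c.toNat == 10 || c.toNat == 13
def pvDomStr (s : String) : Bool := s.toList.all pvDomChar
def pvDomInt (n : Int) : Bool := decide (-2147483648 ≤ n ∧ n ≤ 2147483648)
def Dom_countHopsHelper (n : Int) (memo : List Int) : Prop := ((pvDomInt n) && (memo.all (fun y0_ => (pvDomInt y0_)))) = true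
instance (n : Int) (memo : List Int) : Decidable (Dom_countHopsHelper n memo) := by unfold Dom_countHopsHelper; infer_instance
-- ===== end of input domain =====

-- B computes the same 1/2/3-step hop count bottom-up with one loop instead of A's top-down memoized
-- recursion (objective: simpler/iterative; equivalence is about the RETURN value only — both mutate
-- the Python memo list, but A may leave some -1 slots that B fills).


-- ===== PORT A =====
-- A mutates memo, so the recursive helper returns (value, updated memo); countHopsHelper is its value.
def hopsA (n : Int) (memo : List Int) : Int × List Int :=
  if _h0 : n < 0 then (0, memo)
  else if _h1 : n = 0 then (1, memo)
  else
    match PySem.List.pyGet? memo n with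
    | none => (0, memo)            -- memo[n] raises IndexError: excluded by Pre_
    | some m =>
      if m ≠ -1 then (m, memo)
      else
        let r1 := hopsA (n - 1) memo
        let r2 := hopsA (n - 2) r1.2
        let r3 := hopsA (n - 3) r2.2
        let memo' := r3.2.set n.toNat (r1.1 + r2.1 + r3.1)   -- memo[n] = …  (n ≥ 1, in range under Pre_)
        ((PySem.List.pyGet? memo' n).getD 0, memo')          -- return memo[n]
termination_by n.toNat
decreasing_by all_goals omega

def countHopsHelper (n : Int) (memo : List Int) : Int := (hopsA n memo).1

-- ===== PORT B =====
def stepB (mem : List Int) (i : Int) : List Int :=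
  match PySem.List.pyGet? mem i with
  | none => mem                    -- memo[i] raises IndexError: excluded by Pre_
  | some x =>
    if x = -1 then
      let t1 : Int := if 1 < i then (PySem.List.pyGet? mem (i - 1)).getD 0 else 1
      let t2 : Int := if 2 < i then (PySem.List.pyGet? mem (i - 2)).getD 0 else if i = 2 then 1 else 0
      let t3 : Int := if 3 < i then (PySem.List.pyGet? mem (i - 3)).getD 0 else if i = 3 then 1 else 0
      mem.set i.toNat (t1 + t2 + t3)
    else mem

def countHopsHelper_alt (n : Int) (memo : List Int) : Int :=
  if n < 0 then 0
  else if n = 0 then 1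
  else
    match PySem.List.pyGet? memo n with
    | none => 0                    -- memo[n] raises IndexError: excluded by Pre_
    | some m =>
      if m ≠ -1 then m
      else
        let final := (PySem.List.pyRange 1 (n + 1) 1).foldl stepB memo
        (PySem.List.pyGet? final n).getD 0

-- ===== PRECONDITION & SPEC =====
-- Pre_ excludes exactly the inputs on which Python A raises IndexError (memo[n] with 1 ≤ n, len(memo) ≤ n).
def Pre_countHopsHelper (n : Int) (memo : List Int) : Prop := 1 ≤ n → n < (memo.length : Int)
instance (n : Int) (memo : List Int) : Decidable (Pre_countHopsHelper n memo) := by unfold Pre_countHopsHelper; infer_instance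
def pvWitness_countHopsHelper : Int × List Int := (3, [0, -1, -1, -1])

def Spec_countHopsHelper (n : Int) (memo : List Int) (out : Int) : Prop := out = countHopsHelper_alt n memo
instance (n : Int) (memo : List Int) (out : Int) : Decidable (Spec_countHopsHelper n memo out) := by unfold Spec_countHopsHelper; infer_instance

-- ===== CLAIM (what is proved, stated in full; the proofs are below) =====
def Claim_equal_countHopsHelper : Prop := ∀ (n : Int) (memo : List Int), Dom_countHopsHelper n memo → Pre_countHopsHelper n memo → Spec_countHopsHelper n memo (countHopsHelper n memo)

-- ===== LEMMAS AND PROOFS =====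

-- The pure value recurrence determined by the initial memo: w memo0 k is what both programs
-- return for step count k (a pre-filled slot ≠ -1 is taken at face value).
def w (memo0 : List Int) : Nat → Int
  | 0 => 1
  | (k+1) =>
    match memo0[k+1]? with
    | none => 0
    | some m =>
      if m = -1 then
        w memo0 k + (if _h : 1 ≤ k then w memo0 (k-1) else 0) + (if _h : 2 ≤ k then w memo0 (k-2) else 0)
      else m
termination_by k => k
decreasing_by all_goals omega

-- the value of either program as a function of the signed input
def vInt (memo0 : List Int) (n : Int) : Int :=
  if n < 0 then 0 else if n = 0 then 1 else w memo0 n.toNat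

theorem w_of_ne (memo0 : List Int) (k : Nat) (m : Int) (hk : 1 ≤ k)
    (hget : memo0[k]? = some m) (hne : m ≠ -1) : w memo0 k = m := by
  obtain ⟨j, rfl⟩ : ∃ j, k = j + 1 := ⟨k - 1, by omega⟩
  rw [w, hget]
  simp [hne]

theorem w_of_unset (memo0 : List Int) (k : Nat) (hk : 1 ≤ k)
    (hget : memo0[k]? = some (-1)) :
    w memo0 k = w memo0 (k-1) + (if 2 ≤ k then w memo0 (k-2) else 0) + (if 3 ≤ k then w memo0 (k-3) else 0) := by
  obtain ⟨j, rfl⟩ : ∃ j, k = j + 1 := ⟨k - 1, by omega⟩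
  rw [w, hget]
  have e2 : (2 ≤ j + 1) ↔ (1 ≤ j) := by omega
  have e3 : (3 ≤ j + 1) ↔ (2 ≤ j) := by omega
  have f2 : j + 1 - 2 = j - 1 := by omega
  have f3 : j + 1 - 3 = j - 2 := by omega
  simp only [e2, e3, f2, f3, Nat.add_sub_cancel, dite_eq_ite, reduceIte]

-- the recursive case of vInt as the recurrence of w
theorem vsum (memo0 : List Int) (n : Int) (hn : 1 ≤ n) (hget : memo0[n.toNat]? = some (-1)) :
    vInt memo0 (n-1) + vInt memo0 (n-2) + vInt memo0 (n-3) = w memo0 n.toNat := by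
  rw [w_of_unset memo0 n.toNat (by omega) hget]
  have hw0 : w memo0 0 = 1 := by rw [w]
  have T1 : vInt memo0 (n-1) = w memo0 (n.toNat - 1) := by
    by_cases h : n = 1
    · rw [vInt, if_neg (by omega), if_pos (by omega), show n.toNat - 1 = 0 by omega, hw0]
    · rw [vInt, if_neg (by omega), if_neg (by omega), show (n-1).toNat = n.toNat - 1 by omega]
  have T2 : vInt memo0 (n-2) = if 2 ≤ n.toNat then w memo0 (n.toNat - 2) else 0 := by
    by_cases h : n = 1
    · rw [vInt, if_pos (by omega), if_neg (by omega)]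
    by_cases h2 : n = 2
    · rw [vInt, if_neg (by omega), if_pos (by omega), if_pos (by omega),
        show n.toNat - 2 = 0 by omega, hw0]
    · rw [vInt, if_neg (by omega), if_neg (by omega), if_pos (by omega),
        show (n-2).toNat = n.toNat - 2 by omega]
  have T3 : vInt memo0 (n-3) = if 3 ≤ n.toNat then w memo0 (n.toNat - 3) else 0 := by
    by_cases h : n < 3
    · rw [vInt, if_pos (by omega), if_neg (by omega)]
    by_cases h3 : n = 3
    · rw [vInt, if_neg (by omega), if_pos (by omega), if_pos (by omega),
        show n.toNat - 3 = 0 by omega, hw0]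
    · rw [vInt, if_neg (by omega), if_neg (by omega), if_pos (by omega),
        show (n-3).toNat = n.toNat - 3 by omega]
  rw [T1, T2, T3]

-- A-side invariant: slots ≥ 1 hold either their initial value or the computed w-value (A only writes
-- slots whose initial value was -1).
def InvA (memo0 memo : List Int) : Prop :=
  memo.length = memo0.length ∧ ∀ k : Nat, 1 ≤ k → k < memo0.length →
    memo[k]? = memo0[k]? ∨ (memo0[k]? = some (-1) ∧ memo[k]? = some (w memo0 k))

theorem invA_read (memo0 memo : List Int) (hI : InvA memo0 memo) (k : Nat) (hk : 1 ≤ k)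
    (hlt : k < memo0.length) (m : Int) (hget : memo[k]? = some m) (hne : m ≠ -1) :
    m = w memo0 k := by
  rcases (hI.2 k hk hlt) with h | ⟨h0, h1⟩
  · exact (w_of_ne memo0 k m hk (h ▸ hget) hne).symm
  · rw [hget] at h1; exact (Option.some_injective _ h1)

theorem invA_unset (memo0 memo : List Int) (hI : InvA memo0 memo) (k : Nat) (hk : 1 ≤ k)
    (hlt : k < memo0.length) (hget : memo[k]? = some (-1)) : memo0[k]? = some (-1) := by
  rcases (hI.2 k hk hlt) with h | ⟨h0, h1⟩
  · exact h ▸ hget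
  · exact h0

theorem hopsA_correct (memo0 : List Int) (N : Nat) :
    ∀ (n : Int) (memo : List Int), n.toNat ≤ N → n < (memo0.length : Int) → InvA memo0 memo →
      (hopsA n memo).1 = vInt memo0 n ∧ InvA memo0 (hopsA n memo).2 := by
  induction N with
  | zero =>
    intro n memo hN hlen hI
    rw [hopsA]
    by_cases h0 : n < 0
    · simp [h0, vInt]; exact hI
    · have h1 : n = 0 := by omega
      simp [h1, vInt]; exact hI
  | succ N ih =>
    intro n memo hN hlen hI
    by_cases h0 : n < 0
    · rw [hopsA]; simp [h0, vInt]; exact hI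
    by_cases h1 : n = 0
    · rw [hopsA]; simp [h1, vInt]; exact hI
    have hn1 : 1 ≤ n := by omega
    have hlt : n.toNat < memo0.length := by omega
    have hltm : n.toNat < memo.length := by rw [hI.1]; exact hlt
    have hget : PySem.List.pyGet? memo n = some memo[n.toNat] := by
      rw [PySem.List.pyGet?_of_nonneg _ (by omega), List.getElem?_eq_getElem hltm]
    by_cases hm1 : memo[n.toNat] = -1
    · -- unset: recurse three times, write, re-read
      have hget0 : memo0[n.toNat]? = some (-1) :=
        invA_unset memo0 memo hI n.toNat (by omega) hlt (by rw [List.getElem?_eq_getElem hltm, hm1])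
      obtain ⟨e1, i1⟩ := ih (n-1) memo (by omega) (by omega) hI
      obtain ⟨e2, i2⟩ := ih (n-2) (hopsA (n-1) memo).2 (by omega) (by omega) i1
      obtain ⟨e3, i3⟩ := ih (n-3) (hopsA (n-2) (hopsA (n-1) memo).2).2 (by omega) (by omega) i2
      set s := (hopsA (n-1) memo).1 + (hopsA (n-2) (hopsA (n-1) memo).2).1 +
               (hopsA (n-3) (hopsA (n-2) (hopsA (n-1) memo).2).2).1 with hs
      have hsw : s = w memo0 n.toNat := by
        rw [hs, e1, e2, e3]; exact vsum memo0 n hn1 hget0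
      set memo3 := (hopsA (n-3) (hopsA (n-2) (hopsA (n-1) memo).2).2).2 with hmemo3
      have hlen3 : memo3.length = memo0.length := i3.1
      have hI' : InvA memo0 (memo3.set n.toNat s) := by
        refine ⟨by simp [hlen3], ?_⟩
        intro k hk hklt
        by_cases hkn : k = n.toNat
        · subst hkn
          right
          refine ⟨hget0, ?_⟩
          rw [List.getElem?_set_self (by omega), hsw]
        · have := i3.2 k hk hklt
          rwa [List.getElem?_set_ne (by omega)]
      have hread : PySem.List.pyGet? (memo3.set n.toNat s) n = some s := by
        rw [PySem.List.pyGet?_of_nonneg _ (by omega),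
          List.getElem?_set_self (by omega)]
      rw [hopsA]
      simp only [dif_neg h0, dif_neg h1, hget]
      simp only [hm1, ne_eq, not_true_eq_false, if_false]
      constructor
      · show (PySem.List.pyGet? (memo3.set n.toNat s) n).getD 0 = vInt memo0 n
        rw [hread, Option.getD_some, hsw, vInt, if_neg h0, if_neg h1]
      · exact hI'
    · -- cached: return memo[n] unchanged
      have hw : memo[n.toNat] = w memo0 n.toNat :=
        invA_read memo0 memo hI n.toNat (by omega) hlt memo[n.toNat]
          (List.getElem?_eq_getElem hltm) hm1
      rw [hopsA]
      simp only [dif_neg h0, dif_neg h1, hget, ne_eq, hm1, not_false_eq_true, if_true]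
      exact ⟨by simp [hw, vInt, h0, h1], hI⟩

-- B-side fold invariant: processed slots 1 ≤ k < i hold w-values, unprocessed ones are untouched.
def InvB (memo0 : List Int) (i : Int) (mem : List Int) : Prop :=
  mem.length = memo0.length ∧
  (∀ k : Nat, 1 ≤ k → (k:Int) < i → k < memo0.length → mem[k]? = some (w memo0 k)) ∧
  (∀ k : Nat, (i ≤ (k:Int) ∨ k = 0) → mem[k]? = memo0[k]?)

theorem stepB_invB (memo0 : List Int) (n : Int) (hlen : n < (memo0.length : Int))
    (a : Int) (mem : List Int) (ha : 1 ≤ a) (han : a ≤ n) (hI : InvB memo0 a mem) :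
    InvB memo0 (a+1) (stepB mem a) := by
  have hlt : a.toNat < memo0.length := by omega
  have hltm : a.toNat < mem.length := by rw [hI.1]; exact hlt
  have hx : mem[a.toNat]? = memo0[a.toNat]? := hI.2.2 a.toNat (Or.inl (by omega))
  have hget : PySem.List.pyGet? mem a = some mem[a.toNat] := by
    rw [PySem.List.pyGet?_of_nonneg _ (by omega), List.getElem?_eq_getElem hltm]
  have hget0 : memo0[a.toNat]? = some mem[a.toNat] := by
    rw [← hx, List.getElem?_eq_getElem hltm]
  by_cases hm1 : mem[a.toNat] = -1
  · -- write w memo0 a.toNat into slot a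
    have hg0 : memo0[a.toNat]? = some (-1) := by rw [hget0, hm1]
    have hr : ∀ j : Int, 1 ≤ j → j < a → (PySem.List.pyGet? mem j).getD 0 = w memo0 j.toNat := by
      intro j hj1 hja
      have hjlt : j.toNat < memo0.length := by omega
      rw [PySem.List.pyGet?_of_nonneg _ (by omega),
        hI.2.1 j.toNat (by omega) (by omega) hjlt, Option.getD_some]
    have hw0 : w memo0 0 = 1 := by rw [w]
    have T1 : (if 1 < a then (PySem.List.pyGet? mem (a - 1)).getD 0 else (1:Int))
        = w memo0 (a.toNat - 1) := by
      by_cases h : 1 < a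
      · rw [if_pos h, hr (a-1) (by omega) (by omega), show (a-1).toNat = a.toNat - 1 by omega]
      · rw [if_neg h, show a.toNat - 1 = 0 by omega, hw0]
    have T2 : (if 2 < a then (PySem.List.pyGet? mem (a - 2)).getD 0 else if a = 2 then 1 else (0:Int))
        = if 2 ≤ a.toNat then w memo0 (a.toNat - 2) else 0 := by
      by_cases h : 2 < a
      · rw [if_pos h, hr (a-2) (by omega) (by omega), show (a-2).toNat = a.toNat - 2 by omega,
          if_pos (by omega)]
      by_cases h2 : a = 2
      · rw [if_neg h, if_pos h2, if_pos (by omega), show a.toNat - 2 = 0 by omega, hw0]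
      · rw [if_neg h, if_neg h2, if_neg (by omega)]
    have T3 : (if 3 < a then (PySem.List.pyGet? mem (a - 3)).getD 0 else if a = 3 then 1 else (0:Int))
        = if 3 ≤ a.toNat then w memo0 (a.toNat - 3) else 0 := by
      by_cases h : 3 < a
      · rw [if_pos h, hr (a-3) (by omega) (by omega), show (a-3).toNat = a.toNat - 3 by omega,
          if_pos (by omega)]
      by_cases h3 : a = 3
      · rw [if_neg h, if_pos h3, if_pos (by omega), show a.toNat - 3 = 0 by omega, hw0]
      · rw [if_neg h, if_neg h3, if_neg (by omega)]
    have hsum :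
        ((if 1 < a then (PySem.List.pyGet? mem (a - 1)).getD 0 else (1:Int)) +
         (if 2 < a then (PySem.List.pyGet? mem (a - 2)).getD 0 else if a = 2 then 1 else 0) +
         (if 3 < a then (PySem.List.pyGet? mem (a - 3)).getD 0 else if a = 3 then 1 else 0))
        = w memo0 a.toNat := by
      rw [T1, T2, T3, w_of_unset memo0 a.toNat (by omega) hg0]
    rw [stepB]
    simp only [hget, hm1, if_true]
    rw [hsum]
    refine ⟨by simp [hI.1], ?_, ?_⟩
    · intro k hk hki hklt
      by_cases hkn : k = a.toNat
      · subst hkn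
        rw [List.getElem?_set_self (by omega)]
      · rw [List.getElem?_set_ne (by omega)]
        exact hI.2.1 k hk (by omega) hklt
    · intro k hk
      rw [List.getElem?_set_ne (by omega)]
      exact hI.2.2 k (by omega)
  · -- slot a already filled: untouched, and its value is w memo0 a.toNat
    rw [stepB]
    simp only [hget, if_neg hm1]
    refine ⟨hI.1, ?_, ?_⟩
    · intro k hk hki hklt
      by_cases hkn : k = a.toNat
      · subst hkn
        rw [List.getElem?_eq_getElem hltm,
          w_of_ne memo0 a.toNat mem[a.toNat] (by omega) hget0 hm1]
      · exact hI.2.1 k hk (by omega) hklt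
    · intro k hk
      exact hI.2.2 k (by omega)

theorem foldB_correct (memo0 : List Int) (n : Int) (hlen : n < (memo0.length : Int)) :
    ∀ (fuel : Nat) (a : Int) (mem : List Int), (n + 1 - a).toNat ≤ fuel → 1 ≤ a → a ≤ n + 1 →
      InvB memo0 a mem →
      InvB memo0 (n+1) ((PySem.List.pyRange a (n + 1) 1).foldl stepB mem) := by
  intro fuel
  induction fuel with
  | zero =>
    intro a mem hf ha1 ha2 hI
    have : a = n + 1 := by omega
    subst this
    rw [PySem.List.pyRange_one_eq_nil (by omega)]
    exact hI
  | succ f ih =>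
    intro a mem hf ha1 ha2 hI
    by_cases hend : a = n + 1
    · subst hend
      rw [PySem.List.pyRange_one_eq_nil (by omega)]
      exact hI
    · rw [PySem.List.pyRange_one_cons (by omega), List.foldl_cons]
      exact ih (a+1) (stepB mem a) (by omega) (by omega) (by omega)
        (stepB_invB memo0 n hlen a mem ha1 (by omega) hI)

-- ===== VERDICT (by name: the statement is the Claim_ definition above) =====
theorem countHopsHelper_spec : Claim_equal_countHopsHelper := by
  unfold Claim_equal_countHopsHelper
  intro n memo _hdom hpre
  unfold Spec_countHopsHelper countHopsHelper countHopsHelper_alt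
  by_cases h0 : n < 0
  · rw [hopsA]; simp [h0]
  by_cases h1 : n = 0
  · rw [hopsA]; simp [h1]
  have hn1 : 1 ≤ n := by omega
  have hlen : n < (memo.length : Int) := hpre hn1
  have hltm : n.toNat < memo.length := by omega
  have hget : PySem.List.pyGet? memo n = some memo[n.toNat] := by
    rw [PySem.List.pyGet?_of_nonneg _ (by omega), List.getElem?_eq_getElem hltm]
  have hIA : InvA memo memo := ⟨rfl, fun k _ _ => Or.inl rfl⟩
  have hA := hopsA_correct memo n.toNat n memo le_rfl hlen hIA
  rw [hA.1]
  by_cases hm1 : memo[n.toNat] = -1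
  · -- B runs the fill loop
    have hIB : InvB memo 1 memo := ⟨rfl, fun k hk hki _ => by omega, fun k _ => rfl⟩
    have hF := foldB_correct memo n hlen n.toNat 1 memo (by omega) (by omega) (by omega) hIB
    have hfin : ((PySem.List.pyRange 1 (n + 1) 1).foldl stepB memo)[n.toNat]? = some (w memo n.toNat) :=
      hF.2.1 n.toNat (by omega) (by omega) (by omega)
    simp only [hget, hm1, ne_eq, not_true_eq_false, if_false]
    rw [PySem.List.pyGet?_of_nonneg _ (by omega), hfin, Option.getD_some]
    simp [vInt, h0, h1]
  · simp only [hget, ne_eq, hm1, not_false_eq_true, if_true]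
    rw [vInt, if_neg h0, if_neg h1,
      w_of_ne memo n.toNat memo[n.toNat] (by omega) (List.getElem?_eq_getElem hltm) hm1,
      if_neg h0, if_neg h1]
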